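-- pv_equiv track=rewrite | github.com/RedEyesC/ConfigEditor | Core/DataLoader.py | TryParseMeta
-- ===== SOURCE A (Python) =====
-- def TryParseMeta(metaStr: str):
--     if (metaStr == "") or (not metaStr.startswith("##")):
--         return -1
--
--     orientRow = 1
--
--     attrs = metaStr[2:].split("##")
--     for attr in attrs:
--         if attr == "var":
--             continue
--
--         if attr == "row":
--             orientRow = 1
--             continue
--
--         if attr == "column":
--             orientRow = 0
--
--     return orientRow
-- ===== SOURCE B (Python) =====
-- def TryParseMeta(metaStr: str):
--     if not metaStr.startswith("##"):
--         return -1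
--     for attr in reversed(metaStr[2:].split("##")):
--         if attr == "row":
--             return 1
--         if attr == "column":
--             return 0
--     return 1
-- ===== Notes on version B (the rewrite author's own statement) =====
-- stated objective: simpler
-- what changed: Replaces the forward last-write-wins mutable-flag loop over all tokens with an early-exit reverse scan that returns on the first orientation token, with no accumulator; the redundant empty-string check is folded into startswith.
import Mathlib
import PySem

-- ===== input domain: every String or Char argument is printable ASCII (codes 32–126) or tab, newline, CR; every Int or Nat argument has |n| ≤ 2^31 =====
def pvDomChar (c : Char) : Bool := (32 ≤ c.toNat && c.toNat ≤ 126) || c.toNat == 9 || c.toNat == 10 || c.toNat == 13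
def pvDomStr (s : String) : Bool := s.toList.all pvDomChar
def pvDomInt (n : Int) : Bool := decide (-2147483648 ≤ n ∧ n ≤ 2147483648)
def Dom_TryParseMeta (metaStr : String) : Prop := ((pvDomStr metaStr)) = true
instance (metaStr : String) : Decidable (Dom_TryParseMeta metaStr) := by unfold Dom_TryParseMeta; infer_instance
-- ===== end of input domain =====

-- B replaces A's forward last-write-wins accumulator loop by an early-exit reverse scan with no mutable flag.

-- ===== PORT A =====
def TryParseMeta (metaStr : String) : Int :=
  if metaStr == "" || !(PySem.Str.startswith metaStr "##") then -1
  else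
    let attrs := PySem.Chars.splitOn (PySem.Chars.slice metaStr.toList (some 2) none) "##".toList
    attrs.foldl (fun orientRow attr =>
      if attr = "var".toList then orientRow
      else if attr = "row".toList then (1 : Int)
      else if attr = "column".toList then 0
      else orientRow) 1

-- ===== PORT B =====
-- early-exit scan: first 'row'/'column' wins, default 1
def pvAltScan : List (List Char) → Int
  | [] => 1
  | a :: rest =>
    if a = "row".toList then 1
    else if a = "column".toList then 0
    else pvAltScan rest

def TryParseMeta_alt (metaStr : String) : Int :=
  if !(PySem.Str.startswith metaStr "##") then -1
  else
    pvAltScan (PySem.Chars.splitOn (PySem.Chars.slice metaStr.toList (some 2) none) "##".toList).reverse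

-- ===== PRECONDITION & SPEC =====
def Spec_TryParseMeta (metaStr : String) (out : Int) : Prop := out = TryParseMeta_alt metaStr
instance (metaStr : String) (out : Int) : Decidable (Spec_TryParseMeta metaStr out) := by unfold Spec_TryParseMeta; infer_instance

-- ===== CLAIM (what is proved, stated in full; the proofs are below) =====
def Claim_equal_TryParseMeta : Prop := ∀ (metaStr : String), Dom_TryParseMeta metaStr → Spec_TryParseMeta metaStr (TryParseMeta metaStr)

-- ===== LEMMAS AND PROOFS =====

-- pvAltScan with an arbitrary default (used to relate the fold to the reverse scan)
def pvScanD : List (List Char) → Int → Int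
  | [], d => d
  | a :: rest, d =>
    if a = "row".toList then 1
    else if a = "column".toList then 0
    else pvScanD rest d

def pvStepA (orientRow : Int) (attr : List Char) : Int :=
  if attr = "var".toList then orientRow
  else if attr = "row".toList then 1
  else if attr = "column".toList then 0
  else orientRow

theorem pvScanD_append_singleton (xs : List (List Char)) (a : List Char) (d : Int) :
    pvScanD (xs ++ [a]) d = pvScanD xs (pvStepA d a) := by
  induction xs with
  | nil =>
    show pvScanD [a] d = pvStepA d a
    simp only [pvScanD, pvStepA]
    split_ifs <;> simp_all
  | cons x xs ih =>
    simp only [List.cons_append, pvScanD, ih]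

theorem pvFoldl_eq_scanD (xs : List (List Char)) (d : Int) :
    xs.foldl pvStepA d = pvScanD xs.reverse d := by
  induction xs generalizing d with
  | nil => simp [pvScanD]
  | cons a xs ih =>
    simp only [List.foldl_cons, List.reverse_cons, ih, pvScanD_append_singleton]

theorem pvAltScan_eq_scanD (xs : List (List Char)) : pvAltScan xs = pvScanD xs 1 := by
  induction xs with
  | nil => rfl
  | cons a xs ih => simp only [pvAltScan, pvScanD, ih]

-- ===== VERDICT (by name: the statement is the Claim_ definition above) =====
theorem TryParseMeta_spec : Claim_equal_TryParseMeta := by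
  intro metaStr _
  unfold Spec_TryParseMeta TryParseMeta TryParseMeta_alt
  by_cases he : metaStr = ""
  · subst he; decide
  · cases hb : PySem.Str.startswith metaStr "##" with
    | false => simp [hb]
    | true =>
      simp only [pvAltScan_eq_scanD, Bool.not_true, Bool.false_eq_true, if_false]
      rw [show (metaStr == "") = false from beq_eq_false_iff_ne.mpr he]
      simp only [Bool.or_self, Bool.false_eq_true, if_false]
      exact pvFoldl_eq_scanD _ 1
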